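-- pv_equiv track=rewrite | github.com/Hou-Xiaoxuan/RFID_FMS | pysrc/CoreV2_0/core_v.py | find_dec
-- ===== SOURCE A (Python) =====
-- import math
--
-- def find_dec(k):
--     k.append(math.inf)
--     l_tmp, r_tmp = 0, 0
--     l, r = [], []
--     state = 0
--     for i in range(0, len(k) - 1, 1):
--         if state == 0:
--             if k[i] > k[i + 1]:
--                 state = 1
--                 l_tmp = i
--         elif state == 1:
--             if k[i] < k[i + 1]:
--                 state = 0
--                 r_tmp = i + 1
--                 if r_tmp - l_tmp > 15:
--                     l.append(l_tmp)
--                     r.append(r_tmp)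
--     k.pop()  # r可能越界,但是可以处理
--     return l, r
-- ===== SOURCE B (Python) =====
-- def find_dec(k):
--     # Segment decomposition: cut k at every strict increase (a sentinel cut at
--     # n-1 closes a trailing run at n, like A's math.inf).  Each segment between
--     # cuts is non-increasing; its run starts after the leading plateau.
--     n = len(k)
--     cuts = [i for i in range(n - 1) if k[i] < k[i + 1]] + ([n - 1] if n else [])
--     l, r = [], []
--     seg_start = 0
--     for c in cuts:
--         j = seg_start
--         while j < c and k[j] == k[j + 1]:
--             j += 1
--         if j < c and c + 1 - j > 15:
--             l.append(j)
--             r.append(c + 1)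
--         seg_start = c + 1
--     return l, r
-- ===== Notes on version B (the rewrite author's own statement) =====
-- stated objective: alternative
-- what changed: B replaces A's 0/1 state machine over a sentinel-extended list by a staged segment decomposition: it first collects all strict-increase cut positions (plus a final sentinel cut), then for each segment between cuts skips the leading plateau to find the run start and records the run if longer than 15; k is never mutated.
import Mathlib
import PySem

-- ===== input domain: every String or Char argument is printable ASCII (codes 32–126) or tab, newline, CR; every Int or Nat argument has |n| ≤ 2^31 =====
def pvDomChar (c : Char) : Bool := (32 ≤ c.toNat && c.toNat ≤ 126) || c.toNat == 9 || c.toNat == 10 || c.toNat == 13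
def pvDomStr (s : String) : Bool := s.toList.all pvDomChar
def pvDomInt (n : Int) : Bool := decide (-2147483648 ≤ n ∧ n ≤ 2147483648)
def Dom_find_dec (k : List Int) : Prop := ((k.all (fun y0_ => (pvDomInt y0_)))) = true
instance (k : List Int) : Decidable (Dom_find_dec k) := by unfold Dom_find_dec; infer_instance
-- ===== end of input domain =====

-- B replaces A's 0/1 state machine over a sentinel-extended list by a staged segment
-- decomposition: collect all strict-increase cut positions (plus a final sentinel cut),
-- then per segment skip the leading plateau and record the run if longer than 15.
-- A appends/pops math.inf on k (restoring it); B never mutates k; return values agree.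

-- ===== PORT A =====
-- 'x < y' where `none` plays math.inf (exact: every int < inf, inf < nothing)
def pvInfLt : Option Int → Option Int → Bool
  | some x, some y => decide (x < y)
  | some _, none => true
  | none, _ => false

-- A's loop body, step for step
def pvAStep (k' : List (Option Int)) (s : Int × Int × List Int × List Int × Int) (i : Int) :
    Int × Int × List Int × List Int × Int :=
  let (l_tmp, r_tmp, l, r, state) := s
  if state = 0 then
    if pvInfLt (PySem.List.pyGetD k' (i + 1) none) (PySem.List.pyGetD k' i none) then
      (i, r_tmp, l, r, 1)
    else s
  else if state = 1 then
    if pvInfLt (PySem.List.pyGetD k' i none) (PySem.List.pyGetD k' (i + 1) none) then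
      if i + 1 - l_tmp > 15 then
        (l_tmp, i + 1, l ++ [l_tmp], r ++ [i + 1], 0)
      else (l_tmp, i + 1, l, r, 0)
    else s
  else s

def find_dec (k : List Int) : List Int × List Int :=
  -- k.append(math.inf): the appended inf is modelled as `none` in a List (Option Int)
  let k' : List (Option Int) := k.map some ++ [none]
  let fin := (PySem.List.pyRange 0 ((k'.length : Int) - 1) 1).foldl (pvAStep k')
    (0, 0, ([] : List Int), ([] : List Int), 0)
  (fin.2.2.1, fin.2.2.2.1)

-- ===== PORT B =====
-- the while loop 'while j < c and k[j] == k[j+1]: j += 1'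
def pvSkip (k : List Int) (j c : Int) : Int :=
  if h : j < c ∧ PySem.List.pyGetD k j 0 = PySem.List.pyGetD k (j + 1) 0 then
    pvSkip k (j + 1) c
  else j
termination_by (c - j).toNat
decreasing_by omega

-- B's per-cut loop body
def pvBStep (k : List Int) (s : Int × List Int × List Int) (c : Int) :
    Int × List Int × List Int :=
  if pvSkip k s.1 c < c ∧ c + 1 - pvSkip k s.1 c > 15 then
    (c + 1, s.2.1 ++ [pvSkip k s.1 c], s.2.2 ++ [c + 1])
  else (c + 1, s.2.1, s.2.2)

def find_dec_alt (k : List Int) : List Int × List Int :=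
  let n : Int := (k.length : Int)
  let cuts : List Int :=
    (PySem.List.pyRange 0 (n - 1) 1).filter
      (fun i => decide (PySem.List.pyGetD k i 0 < PySem.List.pyGetD k (i + 1) 0))
    ++ (if k.length ≠ 0 then [n - 1] else [])
  let fin := cuts.foldl (pvBStep k) (0, [], [])
  (fin.2.1, fin.2.2)

-- ===== PRECONDITION & SPEC =====
def Spec_find_dec (k : List Int) (out : List Int × List Int) : Prop := out = find_dec_alt k
instance (k : List Int) (out : List Int × List Int) : Decidable (Spec_find_dec k out) := by unfold Spec_find_dec; infer_instance

-- ===== CLAIM (what is proved, stated in full; the proofs are below) =====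
def Claim_equal_find_dec : Prop := ∀ (k : List Int), Dom_find_dec k → Spec_find_dec k (find_dec k)

-- ===== LEMMAS AND PROOFS =====

-- the cut list of B, started from position s (s = 0 gives Source B's cuts)
def pvCutsFrom (k : List Int) (s : Int) : List Int :=
  (PySem.List.pyRange s ((k.length : Int) - 1) 1).filter
    (fun i => decide (PySem.List.pyGetD k i 0 < PySem.List.pyGetD k (i + 1) 0))
  ++ (if s ≤ (k.length : Int) - 1 then [(k.length : Int) - 1] else [])

-- the first cut at or after s (proof-side; mirrors the head of pvCutsFrom)
def pvFirstCut (k : List Int) (s : Int) : Int :=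
  if h : s < (k.length : Int) - 1 then
    (if PySem.List.pyGetD k s 0 < PySem.List.pyGetD k (s + 1) 0 then s else pvFirstCut k (s + 1))
  else (k.length : Int) - 1
termination_by ((k.length : Int) - 1 - s).toNat
decreasing_by omega

-- indexing into A's sentinel-extended list
theorem pvGetK' (k : List Int) (i : Int) (h0 : 0 ≤ i) (h : i < (k.length : Int)) :
    PySem.List.pyGetD (k.map some ++ [(none : Option Int)]) i none
      = some (PySem.List.pyGetD k i 0) := by
  rw [PySem.List.pyGetD_eq_getElem _ none h0 (by simp; omega),
      PySem.List.pyGetD_eq_getElem _ 0 h0 h]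
  rw [List.getElem_append_left (by simp; omega)]
  simp

theorem pvGetK'_last (k : List Int) :
    PySem.List.pyGetD (k.map some ++ [(none : Option Int)]) ((k.length : Int)) none = none := by
  rw [PySem.List.pyGetD_eq_getElem _ none (by positivity) (by simp)]
  rw [List.getElem_append_right (by simp)]
  simp

-- A stays in state 0 across a plateau
theorem pvA_plateau (k : List Int) (lt rt : Int) (l r : List Int) :
    ∀ (m : Nat) (s t : Int), 0 ≤ s → s ≤ t → t ≤ (k.length : Int) - 1 → t - s ≤ (m : Int) →
    (∀ i : Int, s ≤ i → i < t →
      PySem.List.pyGetD k i 0 = PySem.List.pyGetD k (i + 1) 0) →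
    (PySem.List.pyRange s t 1).foldl (pvAStep (k.map some ++ [none])) (lt, rt, l, r, 0)
      = (lt, rt, l, r, 0) := by
  intro m
  induction m with
  | zero =>
    intro s t h0 hst ht hm hp
    rw [PySem.List.pyRange_one_eq_nil (by omega)]; rfl
  | succ m ih =>
    intro s t h0 hst ht hm hp
    by_cases hlt : s < t
    · rw [PySem.List.pyRange_one_cons hlt]
      simp only [List.foldl_cons]
      have hg0 := pvGetK' k s h0 (by omega)
      have hg1 := pvGetK' k (s + 1) (by omega) (by omega)
      have heq := hp s le_rfl hlt
      have hstep : pvAStep (k.map some ++ [none]) (lt, rt, l, r, 0) s = (lt, rt, l, r, 0) := by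
        simp [pvAStep, hg0, hg1, pvInfLt, heq]
      rw [hstep]
      exact ih (s + 1) t (by omega) (by omega) ht (by push_cast at hm ⊢; omega)
        (fun i hi1 hi2 => hp i (by omega) hi2)
    · rw [PySem.List.pyRange_one_eq_nil (by omega)]; rfl

-- A stays in state 1 across non-increases
theorem pvA_state1 (k : List Int) (lt rt : Int) (l r : List Int) :
    ∀ (m : Nat) (s t : Int), 0 ≤ s → s ≤ t → t ≤ (k.length : Int) - 1 → t - s ≤ (m : Int) →
    (∀ i : Int, s ≤ i → i < t →
      ¬ (PySem.List.pyGetD k i 0 < PySem.List.pyGetD k (i + 1) 0)) →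
    (PySem.List.pyRange s t 1).foldl (pvAStep (k.map some ++ [none])) (lt, rt, l, r, 1)
      = (lt, rt, l, r, 1) := by
  intro m
  induction m with
  | zero =>
    intro s t h0 hst ht hm hp
    rw [PySem.List.pyRange_one_eq_nil (by omega)]; rfl
  | succ m ih =>
    intro s t h0 hst ht hm hp
    by_cases hlt : s < t
    · rw [PySem.List.pyRange_one_cons hlt]
      simp only [List.foldl_cons]
      have hg0 := pvGetK' k s h0 (by omega)
      have hg1 := pvGetK' k (s + 1) (by omega) (by omega)
      have hni := hp s le_rfl hlt
      have hstep : pvAStep (k.map some ++ [none]) (lt, rt, l, r, 1) s = (lt, rt, l, r, 1) := by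
        simp [pvAStep, hg0, hg1, pvInfLt, hni]
      rw [hstep]
      exact ih (s + 1) t (by omega) (by omega) ht (by push_cast at hm ⊢; omega)
        (fun i hi1 hi2 => hp i (by omega) hi2)
    · rw [PySem.List.pyRange_one_eq_nil (by omega)]; rfl

theorem pvSkip_spec (k : List Int) :
    ∀ (m : Nat) (s c : Int), 0 ≤ s → s ≤ c → c - s ≤ (m : Int) →
    s ≤ pvSkip k s c ∧ pvSkip k s c ≤ c ∧
    (∀ i : Int, s ≤ i → i < pvSkip k s c →
      PySem.List.pyGetD k i 0 = PySem.List.pyGetD k (i + 1) 0) ∧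
    (pvSkip k s c < c →
      PySem.List.pyGetD k (pvSkip k s c) 0 ≠ PySem.List.pyGetD k (pvSkip k s c + 1) 0) := by
  intro m
  induction m with
  | zero =>
    intro s c h0 hsc hm
    have hc : c = s := by omega
    subst hc
    rw [pvSkip, dif_neg (by omega)]
    exact ⟨le_rfl, le_rfl, fun i hi1 hi2 => by omega, fun h => by omega⟩
  | succ m ih =>
    intro s c h0 hsc hm
    rw [pvSkip]
    by_cases hg : s < c ∧ PySem.List.pyGetD k s 0 = PySem.List.pyGetD k (s + 1) 0
    · rw [dif_pos hg]
      obtain ⟨h1, h2, h3, h4⟩ := ih (s + 1) c (by omega) (by omega) (by push_cast at hm ⊢; omega)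
      refine ⟨by omega, h2, ?_, h4⟩
      intro i hi1 hi2
      rcases eq_or_lt_of_le hi1 with he | hl
      · exact he ▸ hg.2
      · exact h3 i (by omega) hi2
    · rw [dif_neg hg]
      refine ⟨le_rfl, hsc, fun i hi1 hi2 => by omega, fun hlt heq => hg ⟨hlt, heq⟩⟩

-- A over one whole segment [s, c] (no strict increase before c, c a cut) equals B's per-cut step
theorem pvA_segment (k : List Int) (s c lt rt : Int) (l r : List Int)
    (h0 : 0 ≤ s) (hsc : s ≤ c) (hc : c ≤ (k.length : Int) - 1)
    (hno : ∀ i : Int, s ≤ i → i < c →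
      ¬ (PySem.List.pyGetD k i 0 < PySem.List.pyGetD k (i + 1) 0))
    (hcut : c < (k.length : Int) - 1 →
      PySem.List.pyGetD k c 0 < PySem.List.pyGetD k (c + 1) 0) :
    ∃ lt' rt',
      (PySem.List.pyRange s (c + 1) 1).foldl (pvAStep (k.map some ++ [none])) (lt, rt, l, r, 0)
        = (lt', rt',
           (if pvSkip k s c < c ∧ c + 1 - pvSkip k s c > 15 then l ++ [pvSkip k s c] else l),
           (if pvSkip k s c < c ∧ c + 1 - pvSkip k s c > 15 then r ++ [c + 1] else r), 0) := by
  obtain ⟨hj1, hj2, hj3, hj4⟩ := pvSkip_spec k (c - s).toNat s c h0 hsc (by omega)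
  set j := pvSkip k s c with hjdef
  have hsplit : PySem.List.pyRange s (c + 1) = PySem.List.pyRange s j ++ PySem.List.pyRange j (c + 1) :=
    PySem.List.pyRange_one_append s j (c + 1) hj1 (by omega)
  rw [hsplit, List.foldl_append]
  rw [pvA_plateau k lt rt l r (j - s).toNat s j h0 hj1 (by omega) (by omega) hj3]
  have hgc := pvGetK' k c (by omega) (by omega)
  by_cases hjc : j < c
  · -- run: strict decrease at j, state 1 through the segment, closed at c
    have hg0 := pvGetK' k j (by omega) (by omega)
    have hg1 := pvGetK' k (j + 1) (by omega) (by omega)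
    have hdec : PySem.List.pyGetD k (j + 1) 0 < PySem.List.pyGetD k j 0 := by
      have h5 := hno j hj1 hjc
      have h6 := hj4 hjc
      omega
    rw [PySem.List.pyRange_one_cons (by omega)]
    simp only [List.foldl_cons]
    have hstep : pvAStep (k.map some ++ [none]) (lt, rt, l, r, 0) j = (j, rt, l, r, 1) := by
      simp [pvAStep, hg0, hg1, pvInfLt, hdec]
    rw [hstep]
    have hsplit2 : PySem.List.pyRange (j + 1) (c + 1) = PySem.List.pyRange (j + 1) c ++ [c] :=
      PySem.List.pyRange_one_succ_right (by omega)
    rw [hsplit2, List.foldl_append]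
    rw [pvA_state1 k j rt l r (c - (j + 1)).toNat (j + 1) c (by omega) (by omega) hc (by omega)
      (fun i hi1 hi2 => hno i (by omega) hi2)]
    have hinc : pvInfLt (PySem.List.pyGetD (k.map some ++ [none]) c none)
        (PySem.List.pyGetD (k.map some ++ [none]) (c + 1) none) = true := by
      by_cases hcn : c < (k.length : Int) - 1
      · rw [hgc, pvGetK' k (c + 1) (by omega) (by omega)]
        simp [pvInfLt, hcut hcn]
      · have hce : c + 1 = (k.length : Int) := by omega
        rw [hgc, hce, pvGetK'_last]
        simp [pvInfLt]
    refine ⟨j, c + 1, ?_⟩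
    simp only [List.foldl_cons, List.foldl_nil]
    by_cases hbig : c + 1 - j > 15
    · simp [pvAStep, hinc, hbig, hjc]
    · simp [pvAStep, hinc, hbig, hjc]
  · -- whole segment is a plateau: the single step at c leaves state 0 untouched
    have hjc' : j = c := by omega
    have hngt : pvInfLt (PySem.List.pyGetD (k.map some ++ [none]) (c + 1) none)
        (PySem.List.pyGetD (k.map some ++ [none]) c none) = false := by
      by_cases hcn : c < (k.length : Int) - 1
      · rw [hgc, pvGetK' k (c + 1) (by omega) (by omega)]
        have := hcut hcn
        simp [pvInfLt]
        omega
      · have hce : c + 1 = (k.length : Int) := by omega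
        rw [hce, pvGetK'_last]
        simp [pvInfLt]
    refine ⟨lt, rt, ?_⟩
    rw [hjc', PySem.List.pyRange_one_singleton]
    simp [pvAStep, hngt]

theorem pvFirstCut_spec (k : List Int) :
    ∀ (m : Nat) (s : Int), 0 ≤ s → s ≤ (k.length : Int) - 1 → (k.length : Int) - 1 - s ≤ (m : Int) →
    (s ≤ pvFirstCut k s ∧ pvFirstCut k s ≤ (k.length : Int) - 1 ∧
     (∀ i : Int, s ≤ i → i < pvFirstCut k s →
       ¬ (PySem.List.pyGetD k i 0 < PySem.List.pyGetD k (i + 1) 0)) ∧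
     (pvFirstCut k s < (k.length : Int) - 1 →
       PySem.List.pyGetD k (pvFirstCut k s) 0 < PySem.List.pyGetD k (pvFirstCut k s + 1) 0)) ∧
    pvCutsFrom k s = pvFirstCut k s :: pvCutsFrom k (pvFirstCut k s + 1) := by
  intro m
  induction m with
  | zero =>
    intro s h0 hs hm
    rw [pvFirstCut, dif_neg (by omega)]
    refine ⟨⟨by omega, le_rfl, fun i hi1 hi2 => by omega, fun h => by omega⟩, ?_⟩
    unfold pvCutsFrom
    rw [PySem.List.pyRange_one_eq_nil (by omega), PySem.List.pyRange_one_eq_nil (by omega),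
      if_pos (by omega), if_neg (by omega)]
    rfl
  | succ m ih =>
    intro s h0 hs hm
    by_cases hend : s < (k.length : Int) - 1
    · rw [pvFirstCut, dif_pos hend]
      by_cases hinc : PySem.List.pyGetD k s 0 < PySem.List.pyGetD k (s + 1) 0
      · rw [if_pos hinc]
        refine ⟨⟨le_rfl, by omega, fun i hi1 hi2 => by omega, fun _ => hinc⟩, ?_⟩
        unfold pvCutsFrom
        rw [PySem.List.pyRange_one_cons hend,
          List.filter_cons_of_pos (by simpa using hinc),
          if_pos (by omega), if_pos (by omega)]
        simp
      · rw [if_neg hinc]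
        obtain ⟨⟨h1, h2, h3, h4⟩, hcuts⟩ := ih (s + 1) (by omega) (by omega)
          (by push_cast at hm ⊢; omega)
        refine ⟨⟨by omega, h2, ?_, h4⟩, ?_⟩
        · intro i hi1 hi2
          rcases eq_or_lt_of_le hi1 with he | hl
          · exact he ▸ hinc
          · exact h3 i (by omega) hi2
        · rw [← hcuts]
          unfold pvCutsFrom
          rw [PySem.List.pyRange_one_cons hend,
            List.filter_cons_of_neg (by simpa using hinc),
            if_pos (by omega), if_pos (by omega)]
    · rw [pvFirstCut, dif_neg hend]
      refine ⟨⟨by omega, le_rfl, fun i hi1 hi2 => by omega, fun h => by omega⟩, ?_⟩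
      unfold pvCutsFrom
      rw [PySem.List.pyRange_one_eq_nil (by omega), PySem.List.pyRange_one_eq_nil (by omega),
        if_pos (by omega), if_neg (by omega)]
      rfl

-- main lockstep over segments
theorem pvMain (k : List Int) :
    ∀ (m : Nat) (s lt rt : Int) (l r : List Int), 0 ≤ s → (k.length : Int) - s ≤ (m : Int) →
    (((PySem.List.pyRange s (k.length : Int) 1).foldl
        (pvAStep (k.map some ++ [none])) (lt, rt, l, r, 0)).2.2.1,
     ((PySem.List.pyRange s (k.length : Int) 1).foldl
        (pvAStep (k.map some ++ [none])) (lt, rt, l, r, 0)).2.2.2.1)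
    = (((pvCutsFrom k s).foldl (pvBStep k) (s, l, r)).2.1,
       ((pvCutsFrom k s).foldl (pvBStep k) (s, l, r)).2.2) := by
  intro m
  induction m with
  | zero =>
    intro s lt rt l r h0 hm
    rw [PySem.List.pyRange_one_eq_nil (by push_cast at hm; omega)]
    unfold pvCutsFrom
    rw [PySem.List.pyRange_one_eq_nil (by push_cast at hm; omega), if_neg (by push_cast at hm; omega)]
    rfl
  | succ m ih =>
    intro s lt rt l r h0 hm
    by_cases hns : (k.length : Int) ≤ s
    · rw [PySem.List.pyRange_one_eq_nil (by omega)]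
      unfold pvCutsFrom
      rw [PySem.List.pyRange_one_eq_nil (by omega), if_neg (by omega)]
      rfl
    · have hs : s ≤ (k.length : Int) - 1 := by omega
      obtain ⟨⟨h1, h2, h3, h4⟩, hcuts⟩ :=
        pvFirstCut_spec k ((k.length : Int) - 1 - s).toNat s h0 hs (by omega)
      rw [PySem.List.pyRange_one_append s (pvFirstCut k s + 1) (k.length : Int)
        (by omega) (by omega), List.foldl_append, hcuts]
      obtain ⟨lt', rt', hseg⟩ := pvA_segment k s (pvFirstCut k s) lt rt l r h0 h1 h2 h3 h4
      rw [hseg]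
      simp only [List.foldl_cons]
      have hbstep : pvBStep k (s, l, r) (pvFirstCut k s) =
          (pvFirstCut k s + 1,
           (if pvSkip k s (pvFirstCut k s) < pvFirstCut k s ∧
               pvFirstCut k s + 1 - pvSkip k s (pvFirstCut k s) > 15 then
              l ++ [pvSkip k s (pvFirstCut k s)] else l),
           (if pvSkip k s (pvFirstCut k s) < pvFirstCut k s ∧
               pvFirstCut k s + 1 - pvSkip k s (pvFirstCut k s) > 15 then
              r ++ [pvFirstCut k s + 1] else r)) := by
        unfold pvBStep
        split_ifs <;> rfl
      rw [hbstep]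
      exact ih (pvFirstCut k s + 1) lt' rt' _ _ (by omega) (by push_cast at hm ⊢; omega)

-- ===== VERDICT (by name: the statement is the Claim_ definition above) =====
theorem find_dec_spec : Claim_equal_find_dec := by
  intro k _
  unfold Spec_find_dec
  simp only [find_dec, find_dec_alt]
  have hlen : ((k.map some ++ [(none : Option Int)]).length : Int) - 1 = (k.length : Int) := by
    simp
  rw [hlen]
  have hcuts : ((PySem.List.pyRange 0 ((k.length : Int) - 1) 1).filter
      (fun i => decide (PySem.List.pyGetD k i 0 < PySem.List.pyGetD k (i + 1) 0))
    ++ (if k.length ≠ 0 then [(k.length : Int) - 1] else [])) = pvCutsFrom k 0 := by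
    unfold pvCutsFrom
    congr 1
    split_ifs with ha hb <;> first | rfl | omega
  rw [hcuts]
  exact pvMain k k.length 0 0 0 [] [] le_rfl (by simp)
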